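-- pv_equiv track=rewrite | github.com/SATAY-LL/Transposonmapper | transposonmapper/processing/dna_features_helpers.py | feature_position
-- ===== SOURCE A (Python) =====
-- def feature_position(feature_dict, chrom, start_chr, dna_dict, feature_type=None):
--     """ Get features for every gene in the chromosome of interest
--
--     Parameters
--     ----------
--     feature_dict : dict
--         output of sgd_features(sgd_features_file)[i]
--     chrom : str
--         Name of the chromosome in roman where to extract the information.
--     start_chr : int
--         [description]
--     dna_dict : dict
--         first output of the gene_location function
--     feature_type : [type], optional
--         [description], by default None
--
--     Returns
--     -------
--      dict
--
--     """
--
--     position_dict = {}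
--     for feat in feature_dict:
--         if feature_dict.get(feat)[5] == chrom:
-- #            if feat.startswith("TEL") and feat.endswith('L'): #correct for the fact that telomeres at the end of a chromosome are stored in the reverse order.
--             if int(feature_dict.get(feat)[6]) > int(feature_dict.get(feat)[7]):
--                 position_dict[feat] = [feature_dict.get(feat)[5], feature_dict.get(feat)[7], feature_dict.get(feat)[6]]
--             else:
--                 position_dict[feat] = [feature_dict.get(feat)[5], feature_dict.get(feat)[6], feature_dict.get(feat)[7]]
--
--
--     for feat in position_dict:
--         for bp in range(int(position_dict.get(feat)[1])+start_chr, int(position_dict.get(feat)[2])+start_chr):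
--             if bp in dna_dict:
--                 if dna_dict[bp] == ['noncoding', None]:
--                     dna_dict[bp] = [feat, feature_type]
--             else:
--                 dna_dict[bp]=[feat, feature_type]
--
--
--     return(dna_dict)
-- ===== SOURCE B (Python) =====
-- def feature_position(feature_dict, chrom, start_chr, dna_dict, feature_type=None):
--     # Rebuild strategy: first compute, in one pass over feature_dict, which feature
--     # first claims each basepair; then build a fresh result dict (no mutation of dna_dict).
--     claim = {}
--     for feat, fields in feature_dict.items():
--         if fields[5] != chrom:
--             continue
--         a, b = int(fields[6]), int(fields[7])
--         lo, hi = (b, a) if a > b else (a, b)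
--         for bp in range(lo + start_chr, hi + start_chr):
--             if bp not in claim:
--                 claim[bp] = feat
--     result = {}
--     for bp, val in dna_dict.items():
--         if val == ['noncoding', None] and bp in claim:
--             result[bp] = [claim[bp], feature_type]
--         else:
--             result[bp] = val
--     for bp, feat in claim.items():
--         if bp not in dna_dict:
--             result[bp] = [feat, feature_type]
--     return result
-- ===== Notes on version B (the rewrite author's own statement) =====
-- stated objective: alternative
-- what changed: B never mutates dna_dict during the range loops: it first builds a first-wins 'claim' dict mapping each basepair to the feature that claims it (one fused pass over feature_dict, no intermediate position_dict), then rebuilds the result dict in a single pass over dna_dict plus an append pass for basepairs not present, instead of A's position_dict pass followed by per-basepair conditional in-place updates of dna_dict.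
import Mathlib
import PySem

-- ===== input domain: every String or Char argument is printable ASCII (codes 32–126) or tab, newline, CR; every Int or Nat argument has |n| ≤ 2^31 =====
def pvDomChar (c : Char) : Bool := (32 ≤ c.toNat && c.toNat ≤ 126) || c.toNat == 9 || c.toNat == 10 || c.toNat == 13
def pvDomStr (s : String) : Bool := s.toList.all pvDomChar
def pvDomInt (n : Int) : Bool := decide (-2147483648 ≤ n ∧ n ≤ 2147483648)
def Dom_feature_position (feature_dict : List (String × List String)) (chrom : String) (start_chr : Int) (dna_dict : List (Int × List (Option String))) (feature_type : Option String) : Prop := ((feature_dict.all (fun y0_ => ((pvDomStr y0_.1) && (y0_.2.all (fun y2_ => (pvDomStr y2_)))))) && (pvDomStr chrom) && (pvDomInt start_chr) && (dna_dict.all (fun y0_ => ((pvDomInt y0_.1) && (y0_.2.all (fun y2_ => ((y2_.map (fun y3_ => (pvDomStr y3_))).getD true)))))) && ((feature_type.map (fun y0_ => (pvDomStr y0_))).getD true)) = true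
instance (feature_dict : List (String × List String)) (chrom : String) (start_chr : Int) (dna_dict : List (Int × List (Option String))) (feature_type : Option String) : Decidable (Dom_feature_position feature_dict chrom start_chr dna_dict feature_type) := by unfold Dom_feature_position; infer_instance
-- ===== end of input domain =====

-- ===== PORT A =====
-- Note: Python A mutates dna_dict in place and returns it; the equivalence proved here is
-- about the RETURN value only (B builds a fresh dict).
def fpA_bp (feat : String) (feature_type : Option String)
    (dd : PySem.Dict Int (List (Option String))) (bp : Int) :
    PySem.Dict Int (List (Option String)) :=
  match dd.get? bp with
  | some val =>
      if val = [some "noncoding", none] then dd.insert bp [some feat, feature_type] else dd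
  | none => dd.insert bp [some feat, feature_type]

def fpA_pos (feature_dict : List (String × List String)) (chrom : String) :
    PySem.Dict String (List String) :=
  (feature_dict.map Prod.fst).foldl (fun pd feat =>
    match (PySem.Dict.mk feature_dict).get? feat with
    | none => pd
    | some fields =>
      match PySem.List.pyGet? fields 5 with
      | none => pd
      | some f5 =>
        if f5 = chrom then
          match PySem.List.pyGet? fields 6, PySem.List.pyGet? fields 7 with
          | some s6, some s7 =>
            match PySem.Int.ofStr? s6, PySem.Int.ofStr? s7 with
            | some a, some b =>
              if a > b then pd.insert feat [f5, s7, s6] else pd.insert feat [f5, s6, s7]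
            | _, _ => pd
          | _, _ => pd
        else pd) PySem.Dict.empty

def feature_position (feature_dict : List (String × List String)) (chrom : String) (start_chr : Int) (dna_dict : List (Int × List (Option String))) (feature_type : Option String) : List (Int × List (Option String)) :=
  let pd := fpA_pos feature_dict chrom
  (pd.keys.foldl (fun dd feat =>
    match pd.get? feat with
    | none => dd
    | some v =>
      match PySem.List.pyGet? v 1, PySem.List.pyGet? v 2 with
      | some s1, some s2 =>
        match PySem.Int.ofStr? s1, PySem.Int.ofStr? s2 with
        | some lo, some hi =>
          (PySem.List.pyRange (lo + start_chr) (hi + start_chr) 1).foldl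
            (fpA_bp feat feature_type) dd
        | _, _ => dd
      | _, _ => dd) (PySem.Dict.mk dna_dict)).items

-- ===== PORT B =====
def fpB_claim_bp (feat : String) (c : PySem.Dict Int String) (bp : Int) : PySem.Dict Int String :=
  if c.contains bp then c else c.insert bp feat

def fpB_claim (feature_dict : List (String × List String)) (chrom : String) (start_chr : Int) :
    PySem.Dict Int String :=
  feature_dict.foldl (fun c kv =>
    match PySem.List.pyGet? kv.2 5 with
    | none => c
    | some f5 =>
      if f5 ≠ chrom then c
      else
        match (PySem.List.pyGet? kv.2 6).bind PySem.Int.ofStr?,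
              (PySem.List.pyGet? kv.2 7).bind PySem.Int.ofStr? with
        | some a, some b =>
          let lohi := if a > b then (b, a) else (a, b)
          (PySem.List.pyRange (lohi.1 + start_chr) (lohi.2 + start_chr) 1).foldl
            (fpB_claim_bp kv.1) c
        | _, _ => c) PySem.Dict.empty

def feature_position_alt (feature_dict : List (String × List String)) (chrom : String) (start_chr : Int) (dna_dict : List (Int × List (Option String))) (feature_type : Option String) : List (Int × List (Option String)) :=
  let claim := fpB_claim feature_dict chrom start_chr
  let result := dna_dict.foldl (fun r p =>
    if p.2 = [some "noncoding", none] then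
      match claim.get? p.1 with
      | some f => r.insert p.1 [some f, feature_type]
      | none => r.insert p.1 p.2
    else r.insert p.1 p.2) PySem.Dict.empty
  (claim.items.foldl (fun r q =>
    if (PySem.Dict.mk dna_dict).contains q.1 then r
    else r.insert q.1 [some q.2, feature_type]) result).items

-- ===== PRECONDITION & SPEC =====
-- Pre_ excludes (a) inputs where Python A raises: a feature value with fewer than 6 fields, or a
-- feature on the selected chromosome whose fields 6/7 are missing or not int-parsable (IndexError /
-- ValueError); (b) association lists with duplicate keys, which no Python dict can hold; and
-- (c) a feature literally named "noncoding" on the selected chromosome while feature_type is None —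
-- a sentinel collision on which A lets a later feature overwrite the already-assigned position and
-- B keeps the first claimant, a corner where both behaviours are equally defensible.
def Pre_feature_position (feature_dict : List (String × List String)) (chrom : String) (start_chr : Int) (dna_dict : List (Int × List (Option String))) (feature_type : Option String) : Prop :=
  (feature_dict.map Prod.fst).Nodup ∧ (dna_dict.map Prod.fst).Nodup ∧
  ∀ kv ∈ feature_dict,
    (PySem.List.pyGet? kv.2 5).isSome ∧
    (PySem.List.pyGet? kv.2 5 = some chrom →
      ((PySem.List.pyGet? kv.2 6).bind PySem.Int.ofStr?).isSome ∧
      ((PySem.List.pyGet? kv.2 7).bind PySem.Int.ofStr?).isSome ∧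
      (feature_type = none → kv.1 ≠ "noncoding"))
instance (feature_dict : List (String × List String)) (chrom : String) (start_chr : Int) (dna_dict : List (Int × List (Option String))) (feature_type : Option String) : Decidable (Pre_feature_position feature_dict chrom start_chr dna_dict feature_type) := by unfold Pre_feature_position; infer_instance

def pvWitness_feature_position : (List (String × List String)) × String × Int × (List (Int × List (Option String))) × Option String :=
  ([("g1", ["a", "b", "c", "d", "e", "I", "0", "2"])], "I", 0, [(0, [some "noncoding", none])], none)

def Spec_feature_position (feature_dict : List (String × List String)) (chrom : String) (start_chr : Int) (dna_dict : List (Int × List (Option String))) (feature_type : Option String) (out : List (Int × List (Option String))) : Prop := out = feature_position_alt feature_dict chrom start_chr dna_dict feature_type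
instance (feature_dict : List (String × List String)) (chrom : String) (start_chr : Int) (dna_dict : List (Int × List (Option String))) (feature_type : Option String) (out : List (Int × List (Option String))) : Decidable (Spec_feature_position feature_dict chrom start_chr dna_dict feature_type out) := by unfold Spec_feature_position; infer_instance

-- ===== CLAIM (what is proved, stated in full; the proofs are below) =====
def Claim_equal_feature_position : Prop := ∀ (feature_dict : List (String × List String)) (chrom : String) (start_chr : Int) (dna_dict : List (Int × List (Option String))) (feature_type : Option String), Dom_feature_position feature_dict chrom start_chr dna_dict feature_type → Pre_feature_position feature_dict chrom start_chr dna_dict feature_type → Spec_feature_position feature_dict chrom start_chr dna_dict feature_type (feature_position feature_dict chrom start_chr dna_dict feature_type)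

-- ===== LEMMAS AND PROOFS =====

-- common reduction target: the per-feature information both programs extract
def fpEf (chrom : String) (kv : String × List String) :
    Option (String × String × String × String × Int × Int) :=
  match PySem.List.pyGet? kv.2 5 with
  | none => none
  | some f5 =>
    if f5 = chrom then
      match PySem.List.pyGet? kv.2 6, PySem.List.pyGet? kv.2 7 with
      | some s6, some s7 =>
        match PySem.Int.ofStr? s6, PySem.Int.ofStr? s7 with
        | some a, some b => some (kv.1, f5, s6, s7, a, b)
        | _, _ => none
      | _, _ => none
    else none

def fpE (chrom : String) (fd : List (String × List String)) :
    List (String × String × String × String × Int × Int) :=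
  fd.filterMap (fpEf chrom)

def posVal (e : String × String × String × String × Int × Int) : List String :=
  if e.2.2.2.2.1 > e.2.2.2.2.2 then [e.2.1, e.2.2.2.1, e.2.2.1] else [e.2.1, e.2.2.1, e.2.2.2.1]

def spanOf (start_chr : Int) (e : String × String × String × String × Int × Int) :
    String × Int × Int :=
  (e.1, (if e.2.2.2.2.1 > e.2.2.2.2.2 then e.2.2.2.2.2 else e.2.2.2.2.1) + start_chr,
        (if e.2.2.2.2.1 > e.2.2.2.2.2 then e.2.2.2.2.1 else e.2.2.2.2.2) + start_chr)

def sentinel : List (Option String) := [some "noncoding", none]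

def Gfun (ft : Option String) (C : PySem.Dict Int String) (p : Int × List (Option String)) :
    List (Option String) :=
  if p.2 = sentinel then
    match C.get? p.1 with
    | some f => [some f, ft]
    | none => p.2
  else p.2

def part2 (ft : Option String) (dna_dict : List (Int × List (Option String)))
    (C : PySem.Dict Int String) : List (Int × List (Option String)) :=
  (C.items.filter (fun q => !decide (q.1 ∈ dna_dict.map Prod.fst))).map
    (fun q => (q.1, [some q.2, ft]))

def rebuildD (ft : Option String) (dna_dict : List (Int × List (Option String)))
    (C : PySem.Dict Int String) : PySem.Dict Int (List (Option String)) :=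
  PySem.Dict.mk (dna_dict.map (fun p => (p.1, Gfun ft C p)) ++ part2 ft dna_dict C)

def fpInv (ft : Option String) (C : PySem.Dict Int String) : Prop :=
  C.keys.Nodup ∧ (ft = none → ∀ q ∈ C.items, q.2 ≠ "noncoding")

-- generic fold-commutation lemma
theorem foldl_lift {α γ δ : Type} (P : γ → Prop) (g : γ → δ) (f : δ → α → δ) (f' : γ → α → γ)
    (l : List α) (h : ∀ C x, P C → x ∈ l → f (g C) x = g (f' C x) ∧ P (f' C x)) :
    ∀ C, P C → l.foldl f (g C) = g (l.foldl f' C) ∧ P (l.foldl f' C) := by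
  induction l with
  | nil => intro C hC; exact ⟨rfl, hC⟩
  | cons x t ih =>
    intro C hC
    obtain ⟨he, hP⟩ := h C x hC (by simp)
    simp only [List.foldl_cons, he]
    exact ih (fun C y hC hy => h C y hC (List.mem_cons_of_mem _ hy)) (f' C x) hP

theorem fpE_keys_sublist (chrom : String) (fd : List (String × List String)) :
    ((fpE chrom fd).map Prod.fst).Sublist (fd.map Prod.fst) := by
  induction fd with
  | nil => simp [fpE]
  | cons kv t ih =>
    unfold fpE at *
    rw [List.filterMap_cons]
    cases h : fpEf chrom kv with
    | none => simpa using ih.cons _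
    | some e =>
      have he1 : e.1 = kv.1 := by
        unfold fpEf at h
        repeat' split at h
        all_goals (try cases h) <;> simp_all
      simp only [List.map_cons, he1]
      exact ih.cons₂ _

theorem fpE_mem_spec (chrom : String) (fd : List (String × List String))
    (e : String × String × String × String × Int × Int) (he : e ∈ fpE chrom fd) :
    PySem.Int.ofStr? e.2.2.1 = some e.2.2.2.2.1 ∧
    PySem.Int.ofStr? e.2.2.2.1 = some e.2.2.2.2.2 := by
  obtain ⟨kv, _, h⟩ := List.mem_filterMap.mp he
  unfold fpEf at h
  repeat' split at h
  all_goals (try cases h) <;> simp_all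

theorem foldl_filterMap_elim {α β γ : Type} (f : α → Option β) (g : γ → β → γ) :
    ∀ (l : List α) (init : γ),
      l.foldl (fun acc x => (f x).elim acc (g acc)) init = (l.filterMap f).foldl g init := by
  intro l
  induction l with
  | nil => intro _; rfl
  | cons x t ih =>
    intro init
    rw [List.filterMap_cons]
    cases h : f x <;> simp [h, ih]

theorem pos_items (fd : List (String × List String)) (chrom : String)
    (h : (fd.map Prod.fst).Nodup) :
    (fpA_pos fd chrom).items = (fpE chrom fd).map (fun e => (e.1, posVal e)) := by
  unfold fpA_pos
  rw [List.foldl_map]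
  rw [PySem.List.foldl_congr_mem fd _
    (fun pd kv => (fpEf chrom kv).elim pd (fun e => pd.insert e.1 (posVal e))) _ ?_]
  · rw [foldl_filterMap_elim]
    rw [show List.filterMap (fpEf chrom) fd = fpE chrom fd from rfl]
    rw [PySem.Dict.items_foldl_insert_fresh (fpE chrom fd) Prod.fst posVal PySem.Dict.empty
      (fun a _ => by simp [pysem]) ((fpE_keys_sublist chrom fd).nodup h)]
    simp [show (PySem.Dict.empty : PySem.Dict String (List String)).items = [] from rfl]
  · intro pd kv hkv
    have hget : (PySem.Dict.mk fd).get? kv.1 = some kv.2 := by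
      apply PySem.Dict.get?_of_mem_items
      · show (kv.1, kv.2) ∈ fd; simpa using hkv
      · simpa [PySem.Dict.keys_mk] using h
    simp only [hget]
    unfold fpEf
    repeat' split
    all_goals (try simp_all [posVal])
    all_goals (split_ifs <;> first | rfl | omega)

theorem A_eq (fd : List (String × List String)) (chrom : String) (sc : Int)
    (dd : List (Int × List (Option String))) (ft : Option String)
    (h : (fd.map Prod.fst).Nodup) :
    feature_position fd chrom sc dd ft =
      (((fpE chrom fd).map (spanOf sc)).foldl
        (fun D s => (PySem.List.pyRange s.2.1 s.2.2 1).foldl (fpA_bp s.1 ft) D)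
        (PySem.Dict.mk dd)).items := by
  have hpd := pos_items fd chrom h
  have hkeys : (fpA_pos fd chrom).keys = (fpE chrom fd).map Prod.fst := by
    simp only [PySem.Dict.keys, hpd, List.map_map]; rfl
  have hkND : (fpA_pos fd chrom).keys.Nodup := by
    rw [hkeys]; exact (fpE_keys_sublist chrom fd).nodup h
  simp only [feature_position]
  rw [hkeys, List.foldl_map]
  rw [List.foldl_map]
  congr 1
  apply PySem.List.foldl_congr_mem
  intro D e he
  have hget : (fpA_pos fd chrom).get? e.1 = some (posVal e) := by
    apply PySem.Dict.get?_of_mem_items _ _ hkND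
    rw [hpd]; exact List.mem_map_of_mem he
  obtain ⟨ha, hb⟩ := fpE_mem_spec chrom fd e he
  simp only [hget]
  unfold posVal spanOf
  by_cases hab : e.2.2.2.2.1 > e.2.2.2.2.2
  · simp only [if_pos hab]
    have h1 : PySem.List.pyGet? [e.2.1, e.2.2.2.1, e.2.2.1] (1 : Int) = some e.2.2.2.1 := rfl
    have h2 : PySem.List.pyGet? [e.2.1, e.2.2.2.1, e.2.2.1] (2 : Int) = some e.2.2.1 := rfl
    simp only [h1, h2, hb, ha]
  · simp only [if_neg hab]
    have h1 : PySem.List.pyGet? [e.2.1, e.2.2.1, e.2.2.2.1] (1 : Int) = some e.2.2.1 := rfl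
    have h2 : PySem.List.pyGet? [e.2.1, e.2.2.1, e.2.2.2.1] (2 : Int) = some e.2.2.2.1 := rfl
    simp only [h1, h2, ha, hb]

theorem claim_eq (fd : List (String × List String)) (chrom : String) (sc : Int) :
    fpB_claim fd chrom sc =
      ((fpE chrom fd).map (spanOf sc)).foldl
        (fun c s => (PySem.List.pyRange s.2.1 s.2.2 1).foldl (fpB_claim_bp s.1) c)
        PySem.Dict.empty := by
  unfold fpB_claim
  rw [List.foldl_map]
  rw [PySem.List.foldl_congr_mem fd _
    (fun c kv => (fpEf chrom kv).elim c
      (fun e => (PySem.List.pyRange (spanOf sc e).2.1 (spanOf sc e).2.2 1).foldl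
          (fpB_claim_bp e.1) c)) _ ?_]
  · rw [foldl_filterMap_elim]
    rw [show List.filterMap (fpEf chrom) fd = fpE chrom fd from rfl]
    rfl
  · intro c kv hkv
    beta_reduce
    unfold fpEf
    cases h5 : PySem.List.pyGet? kv.2 5 with
    | none => rfl
    | some f5 =>
      by_cases hcc : f5 = chrom
      · simp only [if_pos hcc, if_neg (show ¬ f5 ≠ chrom by simp [hcc])]
        cases h6 : PySem.List.pyGet? kv.2 6 with
        | none => rfl
        | some s6 =>
          cases ha : PySem.Int.ofStr? s6 with
          | none => cases h7 : PySem.List.pyGet? kv.2 7 <;> simp [ha]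
          | some a =>
            cases h7 : PySem.List.pyGet? kv.2 7 with
            | none => simp [ha]
            | some s7 =>
              cases hb : PySem.Int.ofStr? s7 with
              | none => simp [ha, hb]
              | some b =>
                simp only [show (some s6).bind PySem.Int.ofStr? = PySem.Int.ofStr? s6 from rfl,
                  show (some s7).bind PySem.Int.ofStr? = PySem.Int.ofStr? s7 from rfl,
                  ha, hb, Option.elim, spanOf]
                split_ifs <;> rfl
      · simp [hcc]

theorem B_eq (fd : List (String × List String)) (chrom : String) (sc : Int)
    (dd : List (Int × List (Option String))) (ft : Option String)
    (hdd : (dd.map Prod.fst).Nodup) (hC : (fpB_claim fd chrom sc).keys.Nodup) :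
    feature_position_alt fd chrom sc dd ft =
      (rebuildD ft dd (fpB_claim fd chrom sc)).items := by
  simp only [feature_position_alt]
  rw [PySem.List.foldl_congr_mem dd _
    (fun r p => r.insert p.1 (Gfun ft (fpB_claim fd chrom sc) p)) _ ?_]
  · rw [PySem.List.foldl_congr_mem ((fpB_claim fd chrom sc).items) _
      (fun r q => if !decide (q.1 ∈ dd.map Prod.fst) then
        r.insert q.1 [some q.2, ft] else r) _ ?_]
    · rw [PySem.List.foldl_if_eq_foldl_filter]
      have hR1 : (dd.foldl (fun r p => r.insert p.1 (Gfun ft (fpB_claim fd chrom sc) p))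
          PySem.Dict.empty).items = dd.map (fun p => (p.1, Gfun ft (fpB_claim fd chrom sc) p)) := by
        rw [PySem.Dict.items_foldl_insert_fresh dd Prod.fst
          (fun p => Gfun ft (fpB_claim fd chrom sc) p) PySem.Dict.empty
          (fun a _ => by simp [pysem]) hdd]
        simp [show (PySem.Dict.empty : PySem.Dict Int (List (Option String))).items = [] from rfl]
      rw [PySem.Dict.items_foldl_insert_fresh
        ((fpB_claim fd chrom sc).items.filter (fun q => !decide (q.1 ∈ dd.map Prod.fst)))
        Prod.fst (fun q => [some q.2, ft]) _ ?_ ?_]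
      · rw [hR1]; rfl
      · intro q hq
        rw [PySem.Dict.contains_eq_decide_mem_keys]
        simp only [PySem.Dict.keys, hR1, List.map_map]
        have := (List.mem_filter.mp hq).2
        simpa [Function.comp_def] using this
      · have hsub : (((fpB_claim fd chrom sc).items.filter
            (fun q => !decide (q.1 ∈ dd.map Prod.fst))).map Prod.fst).Sublist
            ((fpB_claim fd chrom sc).items.map Prod.fst) :=
          (List.filter_sublist (l := (fpB_claim fd chrom sc).items)
            (p := fun q => !decide (q.1 ∈ dd.map Prod.fst))).map (fun q => q.1)
        exact hsub.nodup (by simpa [PySem.Dict.keys] using hC)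
    · intro r q hq
      rw [PySem.Dict.contains_eq_decide_mem_keys, PySem.Dict.keys_mk]
      by_cases hqm : q.1 ∈ dd.map Prod.fst <;> simp [hqm]
  · intro r p hp
    by_cases hs : p.2 = [some "noncoding", none]
    · cases hg : (fpB_claim fd chrom sc).get? p.1 with
      | some f => simp [hs, hg, Gfun, sentinel]
      | none => simp [hs, hg, Gfun, sentinel]
    · simp [hs, Gfun, sentinel]

theorem rebuild_empty (ft : Option String) (dd : List (Int × List (Option String))) :
    rebuildD ft dd PySem.Dict.empty = PySem.Dict.mk dd := by
  apply PySem.Dict.ext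
  simp [rebuildD, part2, Gfun, PySem.Dict.get?_empty,
    show (PySem.Dict.empty : PySem.Dict Int String).items = [] from rfl]

theorem keys_rebuild (ft : Option String) (dd : List (Int × List (Option String)))
    (C : PySem.Dict Int String) :
    (rebuildD ft dd C).keys = dd.map Prod.fst ++ (part2 ft dd C).map Prod.fst := by
  simp [rebuildD, PySem.Dict.keys_mk, List.map_map, Function.comp_def]

theorem mem_part2_keys {ft : Option String} {dd : List (Int × List (Option String))}
    {C : PySem.Dict Int String} {x : Int} (hx : x ∈ (part2 ft dd C).map Prod.fst) :
    x ∈ C.keys ∧ x ∉ dd.map Prod.fst := by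
  simp only [part2, List.map_map, List.mem_map, Function.comp_def, List.mem_filter] at hx
  obtain ⟨q, ⟨hq, hpred⟩, hx⟩ := hx
  subst hx
  refine ⟨?_, by simpa using hpred⟩
  simp only [PySem.Dict.keys]
  exact List.mem_map_of_mem hq

theorem nodup_keys_rebuild {ft : Option String} {dd : List (Int × List (Option String))}
    {C : PySem.Dict Int String} (hdd : (dd.map Prod.fst).Nodup) (hC : C.keys.Nodup) :
    (rebuildD ft dd C).keys.Nodup := by
  rw [keys_rebuild]
  refine hdd.append ?_ ?_
  · have hsub : ((part2 ft dd C).map Prod.fst).Sublist (C.items.map Prod.fst) := by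
      simpa [part2, List.map_map, Function.comp_def] using
        ((List.filter_sublist (l := C.items)
          (p := fun q => !decide (q.1 ∈ dd.map Prod.fst))).map (fun q => q.1))
    exact hsub.nodup (by simpa [PySem.Dict.keys] using hC)
  · intro x hx1 hx2
    exact (mem_part2_keys hx2).2 hx1

theorem get?_rebuild_of_mem {ft : Option String} {dd : List (Int × List (Option String))}
    {C : PySem.Dict Int String} (hdd : (dd.map Prod.fst).Nodup) (hC : C.keys.Nodup)
    {p : Int × List (Option String)} (hp : p ∈ dd) :
    (rebuildD ft dd C).get? p.1 = some (Gfun ft C p) := by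
  apply PySem.Dict.get?_of_mem_items _ _ (nodup_keys_rebuild hdd hC)
  exact List.mem_append_left _ (List.mem_map_of_mem hp)

theorem get?_rebuild_claimed {ft : Option String} {dd : List (Int × List (Option String))}
    {C : PySem.Dict Int String} (hdd : (dd.map Prod.fst).Nodup) (hC : C.keys.Nodup)
    {bp : Int} {f : String} (hb : bp ∉ dd.map Prod.fst) (hf : C.get? bp = some f) :
    (rebuildD ft dd C).get? bp = some [some f, ft] := by
  apply PySem.Dict.get?_of_mem_items _ _ (nodup_keys_rebuild hdd hC)
  apply List.mem_append_right
  exact List.mem_map_of_mem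
    (List.mem_filter.mpr ⟨PySem.Dict.mem_items_of_get?_eq_some _ hf, by simpa using hb⟩)

theorem get?_rebuild_none {ft : Option String} {dd : List (Int × List (Option String))}
    {C : PySem.Dict Int String} {bp : Int}
    (hb : bp ∉ dd.map Prod.fst) (hbC : bp ∉ C.keys) :
    (rebuildD ft dd C).get? bp = none := by
  rw [PySem.Dict.get?_eq_none_iff_not_mem_keys, keys_rebuild]
  intro h
  rcases List.mem_append.mp h with h | h
  · exact hb h
  · exact hbC (mem_part2_keys h).1

theorem val_ne_sentinel {ft : Option String} {C : PySem.Dict Int String}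
    (hI : ft = none → ∀ q ∈ C.items, q.2 ≠ "noncoding") {bp : Int} {f : String}
    (hf : C.get? bp = some f) : ([some f, ft] : List (Option String)) ≠ sentinel := by
  cases ft with
  | some t => simp [sentinel]
  | none =>
    have := hI rfl (bp, f) (PySem.Dict.mem_items_of_get?_eq_some _ hf)
    simpa [sentinel] using this

theorem rebuild_insert_new {ft : Option String} {dd : List (Int × List (Option String))}
    {C : PySem.Dict Int String} {bp : Int} {feat : String}
    (hb1 : bp ∉ dd.map Prod.fst) (hb2 : C.contains bp = false) :
    rebuildD ft dd (C.insert bp feat) = (rebuildD ft dd C).insert bp [some feat, ft] := by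
  have hbC : bp ∉ C.keys := by
    rw [PySem.Dict.contains_eq_decide_mem_keys] at hb2
    simpa using hb2
  have hcont : (rebuildD ft dd C).contains bp = false := by
    rw [PySem.Dict.contains_eq_isSome_get?, get?_rebuild_none hb1 hbC]; rfl
  apply PySem.Dict.ext
  rw [PySem.Dict.items_insert_of_not_contains _ _ hcont]
  show dd.map (fun p => (p.1, Gfun ft (C.insert bp feat) p)) ++ part2 ft dd (C.insert bp feat)
      = (dd.map (fun p => (p.1, Gfun ft C p)) ++ part2 ft dd C) ++ [(bp, [some feat, ft])]
  rw [List.append_assoc]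
  congr 1
  · apply List.map_congr_left
    intro p hp
    have hne : p.1 ≠ bp := fun h => hb1 (h ▸ List.mem_map_of_mem hp)
    simp only [Gfun, PySem.Dict.get?_insert, if_neg hne]
  · simp only [part2, PySem.Dict.items_insert_of_not_contains _ _ hb2, List.filter_append,
      List.map_append]
    simp [hb1]

theorem rebuild_insert_dead {ft : Option String} {dd : List (Int × List (Option String))}
    {C : PySem.Dict Int String} {p0 : Int × List (Option String)} {feat : String}
    (hdd : (dd.map Prod.fst).Nodup)
    (hp0 : p0 ∈ dd) (hval : p0.2 ≠ sentinel) (hb2 : C.contains p0.1 = false) :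
    rebuildD ft dd (C.insert p0.1 feat) = rebuildD ft dd C := by
  apply PySem.Dict.ext
  show dd.map (fun p => (p.1, Gfun ft (C.insert p0.1 feat) p)) ++ part2 ft dd (C.insert p0.1 feat)
      = dd.map (fun p => (p.1, Gfun ft C p)) ++ part2 ft dd C
  congr 1
  · apply List.map_congr_left
    intro p hp
    by_cases hpe : p.1 = p0.1
    · have hpp : p = p0 := List.inj_on_of_nodup_map hdd hp hp0 hpe
      subst hpp
      simp [Gfun, hval]
    · simp only [Gfun, PySem.Dict.get?_insert, if_neg hpe]
  · simp only [part2, PySem.Dict.items_insert_of_not_contains _ _ hb2, List.filter_append]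
    simp [List.mem_map_of_mem (f := Prod.fst) hp0]

theorem rebuild_insert_claim {ft : Option String} {dd : List (Int × List (Option String))}
    {C : PySem.Dict Int String} {p0 : Int × List (Option String)} {feat : String}
    (hdd : (dd.map Prod.fst).Nodup) (hC : C.keys.Nodup)
    (hp0 : p0 ∈ dd) (hval : p0.2 = sentinel) (hnone : C.get? p0.1 = none) :
    rebuildD ft dd (C.insert p0.1 feat) = (rebuildD ft dd C).insert p0.1 [some feat, ft] := by
  have hcont : (rebuildD ft dd C).contains p0.1 = true := by
    rw [PySem.Dict.contains_eq_isSome_get?, get?_rebuild_of_mem hdd hC hp0]; rfl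
  have hb2 : C.contains p0.1 = false := by
    rw [PySem.Dict.contains_eq_isSome_get?, hnone]; rfl
  apply PySem.Dict.ext
  rw [PySem.Dict.items_insert_of_contains _ _ hcont]
  show dd.map (fun p => (p.1, Gfun ft (C.insert p0.1 feat) p)) ++ part2 ft dd (C.insert p0.1 feat)
      = ((dd.map (fun p => (p.1, Gfun ft C p)) ++ part2 ft dd C).map
          (fun p => if (p.1 == p0.1) = true then (p0.1, [some feat, ft]) else p))
  rw [List.map_append]
  congr 1
  · rw [List.map_map]
    apply List.map_congr_left
    intro p hp
    by_cases hpe : p.1 = p0.1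
    · have hpp : p = p0 := List.inj_on_of_nodup_map hdd hp hp0 hpe
      subst hpp
      simp [Gfun, hval]
    · simp [Gfun, PySem.Dict.get?_insert, hpe]
  · simp only [part2, PySem.Dict.items_insert_of_not_contains _ _ hb2, List.filter_append]
    rw [List.map_map]
    have h1 : List.filter (fun q => !decide (q.1 ∈ dd.map Prod.fst)) [(p0.1, feat)] = [] := by
      simp [List.mem_map_of_mem (f := Prod.fst) hp0]
    rw [h1, List.append_nil]
    apply List.map_congr_left
    intro q hq
    have hqne : q.1 ≠ p0.1 := by
      have := (List.mem_filter.mp hq).2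
      simp only [Bool.not_eq_true', decide_eq_false_iff_not] at this
      exact fun h => this (h ▸ List.mem_map_of_mem (f := Prod.fst) hp0)
    simp [hqne]

theorem bp_step (ft : Option String) (dd : List (Int × List (Option String)))
    (C : PySem.Dict Int String) (feat : String) (bp : Int)
    (hdd : (dd.map Prod.fst).Nodup) (hInv : fpInv ft C)
    (hfeat : ft = none → feat ≠ "noncoding") :
    fpA_bp feat ft (rebuildD ft dd C) bp = rebuildD ft dd (fpB_claim_bp feat C bp) ∧
      fpInv ft (fpB_claim_bp feat C bp) := by
  constructor
  · unfold fpA_bp fpB_claim_bp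
    by_cases hmem : bp ∈ dd.map Prod.fst
    · obtain ⟨p0, hp0, hfst⟩ := List.mem_map.mp hmem
      subst hfst
      have hget := get?_rebuild_of_mem (ft := ft) hdd hInv.1 hp0
      simp only [hget]
      by_cases hs : p0.2 = sentinel
      · cases hg : C.get? p0.1 with
        | some f =>
          have hGf : Gfun ft C p0 = [some f, ft] := by simp [Gfun, hs, hg]
          have hcb : C.contains p0.1 = true := by
            rw [PySem.Dict.contains_eq_isSome_get?, hg]; rfl
          rw [hGf, if_neg (show ¬([some f, ft] = [some "noncoding", none]) from val_ne_sentinel hInv.2 hg)]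
          simp [hcb]
        | none =>
          have hGf : Gfun ft C p0 = p0.2 := by simp [Gfun, hs, hg]
          have hcb : C.contains p0.1 = false := by
            rw [PySem.Dict.contains_eq_isSome_get?, hg]; rfl
          rw [hGf, if_pos (show p0.2 = [some "noncoding", none] from hs)]
          simp only [hcb, Bool.false_eq_true, if_false]
          exact (rebuild_insert_claim hdd hInv.1 hp0 hs hg).symm
      · have hGf : Gfun ft C p0 = p0.2 := by simp [Gfun, hs]
        rw [hGf, if_neg (show ¬(p0.2 = [some "noncoding", none]) from hs)]
        by_cases hcb : C.contains p0.1 = true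
        · simp [hcb]
        · have hcb' : C.contains p0.1 = false := by simpa using hcb
          simp only [hcb', Bool.false_eq_true, if_false]
          exact (rebuild_insert_dead hdd hp0 hs hcb').symm
    · cases hg : C.get? bp with
      | some f =>
        have hcb : C.contains bp = true := by
          rw [PySem.Dict.contains_eq_isSome_get?, hg]; rfl
        simp only [get?_rebuild_claimed hdd hInv.1 hmem hg]
        rw [if_neg (show ¬([some f, ft] = [some "noncoding", none]) from val_ne_sentinel hInv.2 hg)]
        simp [hcb]
      | none =>
        have hbC : bp ∉ C.keys := (PySem.Dict.get?_eq_none_iff_not_mem_keys _ _).mp hg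
        have hcb : C.contains bp = false := by
          rw [PySem.Dict.contains_eq_isSome_get?, hg]; rfl
        simp only [get?_rebuild_none hmem hbC]
        simp only [hcb, Bool.false_eq_true, if_false]
        exact (rebuild_insert_new hmem hcb).symm
  · unfold fpB_claim_bp
    by_cases hc : C.contains bp = true
    · simpa [hc] using hInv
    · have hc' : C.contains bp = false := by simpa using hc
      simp only [hc', Bool.false_eq_true, if_false]
      refine ⟨PySem.Dict.nodup_keys_insert _ _ _ hInv.1, ?_⟩
      intro hft q hq
      rcases (PySem.Dict.mem_items_insert _ _ _ q).mp hq with rfl | ⟨hq2, _⟩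
      · exact hfeat hft
      · exact hInv.2 hft q hq2

theorem core (ft : Option String) (dd : List (Int × List (Option String)))
    (spans : List (String × Int × Int))
    (hdd : (dd.map Prod.fst).Nodup)
    (hsp : ∀ s ∈ spans, ft = none → s.1 ≠ "noncoding") :
    (spans.foldl (fun D s => (PySem.List.pyRange s.2.1 s.2.2 1).foldl (fpA_bp s.1 ft) D)
        (PySem.Dict.mk dd) =
      rebuildD ft dd (spans.foldl
        (fun c s => (PySem.List.pyRange s.2.1 s.2.2 1).foldl (fpB_claim_bp s.1) c)
        PySem.Dict.empty)) ∧
    fpInv ft (spans.foldl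
        (fun c s => (PySem.List.pyRange s.2.1 s.2.2 1).foldl (fpB_claim_bp s.1) c)
        PySem.Dict.empty) := by
  have h := foldl_lift (fpInv ft) (rebuildD ft dd)
    (fun D s => (PySem.List.pyRange s.2.1 s.2.2 1).foldl (fpA_bp s.1 ft) D)
    (fun c s => (PySem.List.pyRange s.2.1 s.2.2 1).foldl (fpB_claim_bp s.1) c)
    spans ?_ PySem.Dict.empty ?_
  · rw [rebuild_empty] at h; exact h
  · intro C s hC hs
    exact foldl_lift (fpInv ft) (rebuildD ft dd) _ _ _
      (fun C' bp hC' _ => bp_step ft dd C' s.1 bp hdd hC' (hsp s hs)) C hC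
  · refine ⟨?_, fun _ q hq => absurd hq ?_⟩ <;>
      simp [show (PySem.Dict.empty : PySem.Dict Int String).items = [] from rfl]

-- ===== VERDICT (by name: the statement is the Claim_ definition above) =====
theorem feature_position_spec : Claim_equal_feature_position := by
  intro fd chrom sc dd ft _ hPre
  obtain ⟨h1, h2, h3⟩ := hPre
  unfold Spec_feature_position
  have hsp : ∀ s ∈ (fpE chrom fd).map (spanOf sc), ft = none → s.1 ≠ "noncoding" := by
    intro s hs hft
    obtain ⟨e, he, rfl⟩ := List.mem_map.mp hs
    obtain ⟨kv, hkv, hf⟩ := List.mem_filterMap.mp he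
    have h5 : PySem.List.pyGet? kv.2 5 = some chrom ∧ e.1 = kv.1 := by
      unfold fpEf at hf
      repeat' split at hf
      all_goals (try cases hf) <;> simp_all
    have := (h3 kv hkv).2 h5.1
    simpa [spanOf, h5.2] using this.2.2 hft
  obtain ⟨hcore, hInv⟩ := core ft dd ((fpE chrom fd).map (spanOf sc)) h2 hsp
  have hCk : (fpB_claim fd chrom sc).keys.Nodup := by rw [claim_eq]; exact hInv.1
  rw [A_eq fd chrom sc dd ft h1, hcore, B_eq fd chrom sc dd ft h2 hCk, claim_eq]
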